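-- pv_equiv track=rewrite | github.com/lusteven901228/db2025-final-project | back_DB.py | convert_168bit_to_ranges
-- ===== SOURCE A (Python) =====
-- def convert_168bit_to_ranges(bitstring):
--     if len(bitstring) != 168:
--         return ["Invalid length (must be 168 bits)"]
--
--     days = ["Mon", "Tue", "Wed", "Thu", "Fri", "Sat", "Sun"]
--     results = []
--
--     for day_index in range(7):
--         day_bits = bitstring[day_index*24:(day_index+1)*24]
--
--         start = None
--         for hour in range(24):
--             if day_bits[hour] == "1":
--                 if start is None:
--                     start = hour
--             else:
--                 if start is not None:
--                     results.append(f"{days[day_index]} {start}:00~{hour}:00")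
--                     start = None
--
--         # 若一天最後仍在區段中，結束在 24:00
--         if start is not None:
--             results.append(f"{days[day_index]} {start}:00~24:00")
--
--     return results
-- ===== SOURCE B (Python) =====
-- def _runs(bits, h):
--     # maximal runs of "1" in bits, as (start, end) hour pairs, h = absolute offset
--     if not bits:
--         return []
--     if bits[0] != "1":
--         return _runs(bits[1:], h + 1)
--     k = 0
--     while k < len(bits) and bits[k] == "1":
--         k += 1
--     return [(h, h + k)] + _runs(bits[k:], h + k)
--
--
-- def convert_168bit_to_ranges(bitstring):
--     if len(bitstring) != 168:
--         return ["Invalid length (must be 168 bits)"]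
--     days = ["Mon", "Tue", "Wed", "Thu", "Fri", "Sat", "Sun"]
--     return [f"{day} {s}:00~{e}:00"
--             for d, day in enumerate(days)
--             for s, e in _runs(bitstring[d*24:(d+1)*24], 0)]
-- ===== Notes on version B (the rewrite author's own statement) =====
-- stated objective: alternative
-- what changed: Replaces A's stateful hour-by-hour scan (Option start flag, in-loop appends, end-of-day patch) by a recursive run-splitter that consumes each maximal run of '1's at once (count leading ones, drop, recurse) and a single flat comprehension over enumerate(days); no end-of-day special case is needed.
import Mathlib
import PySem

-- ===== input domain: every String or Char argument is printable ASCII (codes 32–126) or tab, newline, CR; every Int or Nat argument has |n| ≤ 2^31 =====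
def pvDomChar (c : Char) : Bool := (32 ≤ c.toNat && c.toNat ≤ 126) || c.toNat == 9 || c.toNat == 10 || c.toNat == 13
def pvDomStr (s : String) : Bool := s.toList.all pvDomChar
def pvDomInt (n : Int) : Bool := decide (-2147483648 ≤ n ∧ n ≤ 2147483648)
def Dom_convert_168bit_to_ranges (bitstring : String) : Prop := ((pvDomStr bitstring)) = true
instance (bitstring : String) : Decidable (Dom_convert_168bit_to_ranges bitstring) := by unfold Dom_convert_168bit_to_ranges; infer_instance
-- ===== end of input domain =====

-- B replaces A's stateful per-hour scan by a recursive run-splitter plus one flat comprehension (alternative decomposition, same cost).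

-- shared formatting helper: f"{day} {s}:00~{e}:00" (A's literal "~24:00" tail is this with e = 24)
def pvFmt (day : String) (s e : Int) : String :=
  String.ofList (day.toList ++ ' ' :: (PySem.Int.toChars s ++ ':' :: '0' :: '0' :: '~' :: (PySem.Int.toChars e ++ [':', '0', '0'])))

-- ===== PORT A =====
-- A's inner-loop body: state (results, start), hour index, current bit character
def aStep (name : String) (p : List String × Option Int) (hour : Int) (c : Char) : List String × Option Int :=
  if c == '1' then
    (p.1, match p.2 with | none => some hour | some s => some s)
  else
    match p.2 with
    | some s => (p.1 ++ [pvFmt name s hour], none)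
    | none => (p.1, none)

def convert_168bit_to_ranges (bitstring : String) : List String :=
  if PySem.Str.len bitstring ≠ 168 then ["Invalid length (must be 168 bits)"] else
  let days : List String := ["Mon", "Tue", "Wed", "Thu", "Fri", "Sat", "Sun"]
  (PySem.List.pyRange 0 7 1).foldl (fun results day_index =>
    let day_bits := PySem.List.slice bitstring.toList (some (day_index * 24)) (some ((day_index + 1) * 24))
    let name := PySem.List.pyGetD days day_index ""
    let st := (PySem.List.pyRange 0 24 1).foldl
      (fun p hour => aStep name p hour (PySem.List.pyGetD day_bits hour ' ')) (results, none)
    match st.2 with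
    | some s => st.1 ++ [pvFmt name s 24]
    | none => st.1) []

-- ===== PORT B =====
-- number of leading '1' characters (the Python while loop)
def countOnes : List Char → Nat
  | [] => 0
  | c :: t => if c == '1' then countOnes t + 1 else 0

-- _runs: maximal runs of '1' as (start, end) pairs
def runsB : List Char → Int → List (Int × Int)
  | [], _ => []
  | c :: t, h =>
    if c != '1' then runsB t (h + 1)
    else (h, h + (countOnes t : Int) + 1) :: runsB (t.drop (countOnes t)) (h + (countOnes t : Int) + 1)
termination_by cs _ => cs.length
decreasing_by all_goals (simp [List.length_drop]; try omega)

def convert_168bit_to_ranges_alt (bitstring : String) : List String :=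
  if PySem.Str.len bitstring ≠ 168 then ["Invalid length (must be 168 bits)"] else
  (PySem.List.enumerate ["Mon", "Tue", "Wed", "Thu", "Fri", "Sat", "Sun"] 0).flatMap
    (fun p =>
      (runsB (PySem.List.slice bitstring.toList (some (p.1 * 24)) (some ((p.1 + 1) * 24))) 0).map
        (fun r => pvFmt p.2 r.1 r.2))

-- ===== PRECONDITION & SPEC =====
def Spec_convert_168bit_to_ranges (bitstring : String) (out : List String) : Prop := out = convert_168bit_to_ranges_alt bitstring
instance (bitstring : String) (out : List String) : Decidable (Spec_convert_168bit_to_ranges bitstring out) := by unfold Spec_convert_168bit_to_ranges; infer_instance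

-- ===== CLAIM (what is proved, stated in full; the proofs are below) =====
def Claim_equal_convert_168bit_to_ranges : Prop := ∀ (bitstring : String), Dom_convert_168bit_to_ranges bitstring → Spec_convert_168bit_to_ranges bitstring (convert_168bit_to_ranges bitstring)

-- ===== LEMMAS AND PROOFS =====

-- A's state machine as a structural recursion over the (index, char) stream
def loopA (name : String) : List Char → Int → (List String × Option Int) → (List String × Option Int)
  | [], _, p => p
  | c :: t, i, p => loopA name t (i + 1) (aStep name p i c)

-- A's state machine as abstract runs (closing an open run at the final index)
def runsA : List Char → Int → Option Int → List (Int × Int)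
  | [], _, none => []
  | [], i, some s => [(s, i)]
  | c :: t, i, none => if c == '1' then runsA t (i + 1) (some i) else runsA t (i + 1) none
  | c :: t, i, some s => if c == '1' then runsA t (i + 1) (some s) else (s, i) :: runsA t (i + 1) none

lemma foldl_range_getD (name : String) :
    ∀ (cs full : List Char) (a : Nat), cs = full.drop a → ∀ (init : List String × Option Int),
    (PySem.List.pyRange a (a + cs.length) 1).foldl
      (fun p hour => aStep name p hour (PySem.List.pyGetD full hour ' ')) init
    = loopA name cs a init := by
  intro cs
  induction cs with
  | nil =>
    intro full a _ init
    simp [PySem.List.pyRange_one_eq_nil, loopA]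
  | cons c t ih =>
    intro full a h init
    have hlt : (a : Int) < a + (t.length + 1) := by omega
    have hget : full[a]? = some c := by
      have : (full.drop a)[0]? = some c := by rw [← h]; simp
      simpa using this
    have ht : t = full.drop (a + 1) := by
      have h2 : (full.drop a).tail = full.drop (a + 1) := by rw [List.tail_drop]
      rw [← h2, ← h]
      rfl
    rw [show ((a : Int) + ((c :: t).length : Nat)) = (a : Int) + (t.length + 1) by simp,
        PySem.List.pyRange_one_cons hlt]
    simp only [List.foldl_cons]
    have heq := ih full (a + 1) ht (aStep name init a (PySem.List.pyGetD full a ' '))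
    push_cast at heq
    rw [show ((a : Int) + ((t.length : Nat) + 1)) = ((a : Int) + 1) + (t.length : Nat) by ring]
    have hch : PySem.List.pyGetD full (a : Int) ' ' = c := by
      rw [PySem.List.pyGetD_natCast]
      simp [List.getD, hget]
    rw [heq, loopA, hch]

-- the patched state machine produces exactly the formatted runs
lemma loopA_patch (name : String) :
    ∀ (cs : List Char) (i : Int) (res : List String) (st : Option Int),
    (match (loopA name cs i (res, st)).2 with
      | some s => (loopA name cs i (res, st)).1 ++ [pvFmt name s (i + cs.length)]
      | none => (loopA name cs i (res, st)).1)
    = res ++ (runsA cs i st).map (fun r => pvFmt name r.1 r.2) := by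
  intro cs
  induction cs with
  | nil =>
    intro i res st
    cases st <;> simp [loopA, runsA]
  | cons c t ih =>
    intro i res st
    have hl : i + (((c :: t).length : Nat) : Int) = (i + 1) + (t.length : Nat) := by
      push_cast [List.length_cons]; ring
    cases st with
    | none =>
      rw [loopA, runsA]
      by_cases hc : c == '1'
      · simp only [hc, if_pos, aStep]
        have := ih (i + 1) res (some i)
        rw [hl]
        simpa using this
      · simp only [hc, aStep, Bool.false_eq_true, if_false]
        have := ih (i + 1) res none
        rw [hl]
        simpa using this
    | some s =>
      rw [loopA, runsA]
      by_cases hc : c == '1'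
      · simp only [hc, if_pos, aStep]
        have := ih (i + 1) res (some s)
        rw [hl]
        simpa using this
      · simp only [hc, aStep, Bool.false_eq_true, if_false]
        have := ih (i + 1) (res ++ [pvFmt name s i]) none
        rw [hl, this]
        simp

-- A's abstract runs equal B's run-splitter
lemma runsA_eq_runsB :
    ∀ (cs : List Char) (i : Int),
    runsA cs i none = runsB cs i ∧
    ∀ s, runsA cs i (some s) =
      (s, i + (countOnes cs : Int)) :: runsB (cs.drop (countOnes cs)) (i + (countOnes cs : Int)) := by
  intro cs
  induction cs with
  | nil =>
    intro i
    constructor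
    · rw [runsA, runsB]
    · intro s
      rw [runsA]
      simp [runsB, countOnes]
  | cons c t ih =>
    intro i
    by_cases hc : c == '1'
    · have hc' : c = '1' := by simpa using hc
      have h1 : countOnes (c :: t) = countOnes t + 1 := by simp [countOnes, hc]
      have hd : (c :: t).drop (countOnes t + 1) = t.drop (countOnes t) := by simp
      have hbne : (c != '1') = false := by simp [hc']
      constructor
      · rw [runsA]
        simp only [hc, if_true]
        rw [(ih (i + 1)).2 i, runsB]
        simp only [hbne, Bool.false_eq_true, if_false]
        rw [show i + 1 + (countOnes t : Int) = i + (countOnes t : Int) + 1 by ring]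
      · intro s
        rw [runsA]
        simp only [hc, if_true]
        rw [(ih (i + 1)).2 s, h1, hd]
        rw [show i + 1 + (countOnes t : Int) = i + ((countOnes t + 1 : Nat) : Int) by push_cast; ring]
    · have hc' : ¬ c = '1' := by simpa using hc
      have h0 : countOnes (c :: t) = 0 := by simp [countOnes, hc]
      have hbne : (c != '1') = true := by simp [hc']
      constructor
      · rw [runsA]
        simp only [hc, Bool.false_eq_true, if_false]
        rw [(ih (i + 1)).1, runsB]
        simp only [hbne, if_true]
      · intro s
        rw [runsA]
        simp only [hc, Bool.false_eq_true, if_false]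
        rw [(ih (i + 1)).1, h0]
        simp only [List.drop_zero, Nat.cast_zero, add_zero]
        rw [runsB]
        simp only [hbne, if_true]

-- one full day of A equals one block of B
lemma day_eq (name : String) (bits : List Char) (hb : bits.length = 24) (results : List String) :
    (match ((PySem.List.pyRange 0 24 1).foldl
        (fun p hour => aStep name p hour (PySem.List.pyGetD bits hour ' ')) (results, none)).2 with
      | some s => ((PySem.List.pyRange 0 24 1).foldl
        (fun p hour => aStep name p hour (PySem.List.pyGetD bits hour ' ')) (results, none)).1 ++ [pvFmt name s 24]
      | none => ((PySem.List.pyRange 0 24 1).foldl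
        (fun p hour => aStep name p hour (PySem.List.pyGetD bits hour ' ')) (results, none)).1)
    = results ++ (runsB bits 0).map (fun r => pvFmt name r.1 r.2) := by
  have h24 : (PySem.List.pyRange 0 24 1) = PySem.List.pyRange (0 : Nat) ((0 : Nat) + (bits.length : Nat)) 1 := by
    rw [hb]; norm_num
  rw [h24, foldl_range_getD name bits bits 0 (by simp)]
  simp only [Nat.cast_zero]
  have := loopA_patch name bits 0 results none
  rw [show (0 : Int) + (bits.length : Nat) = 24 by rw [hb]; norm_num] at this
  rw [this, (runsA_eq_runsB bits 0).1]

-- ===== VERDICT (by name: the statement is the Claim_ definition above) =====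
theorem convert_168bit_to_ranges_spec : Claim_equal_convert_168bit_to_ranges := by
  intro bitstring _
  unfold Spec_convert_168bit_to_ranges convert_168bit_to_ranges convert_168bit_to_ranges_alt
  by_cases hlen : PySem.Str.len bitstring = 168
  case neg => rw [if_pos hlen, if_pos hlen]
  case pos =>
    rw [if_neg (by simpa [PySem.Str.len_eq] using hlen), if_neg (by simpa [PySem.Str.len_eq] using hlen)]
    have hlen' : bitstring.toList.length = 168 := by
      have := PySem.Str.len_eq bitstring
      omega
    have hsl : ∀ a b : Int, 0 ≤ a → a.toNat ≤ 144 → b - a = 24 → 0 ≤ b →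
        (PySem.List.slice bitstring.toList (some a) (some b)).length = 24 := by
      intro a b ha h144 hba hb
      rw [PySem.List.slice_toNat _ ha hb]
      simp [hlen', List.length_take, List.length_drop]
      omega
    rw [show PySem.List.pyRange 0 7 1 = [0, 1, 2, 3, 4, 5, 6] from by decide,
        show PySem.List.enumerate ["Mon", "Tue", "Wed", "Thu", "Fri", "Sat", "Sun"] (0 : Int)
          = [(0, "Mon"), (1, "Tue"), (2, "Wed"), (3, "Thu"), (4, "Fri"), (5, "Sat"), (6, "Sun")] from by decide]
    simp only [List.foldl_cons, List.foldl_nil, List.flatMap_cons, List.flatMap_nil]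
    rw [day_eq _ _ (hsl (0 * 24) ((0 + 1) * 24) (by norm_num) (by norm_num) (by norm_num) (by norm_num)),
        day_eq _ _ (hsl (1 * 24) ((1 + 1) * 24) (by norm_num) (by norm_num) (by norm_num) (by norm_num)),
        day_eq _ _ (hsl (2 * 24) ((2 + 1) * 24) (by norm_num) (by norm_num) (by norm_num) (by norm_num)),
        day_eq _ _ (hsl (3 * 24) ((3 + 1) * 24) (by norm_num) (by norm_num) (by norm_num) (by norm_num)),
        day_eq _ _ (hsl (4 * 24) ((4 + 1) * 24) (by norm_num) (by norm_num) (by norm_num) (by norm_num)),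
        day_eq _ _ (hsl (5 * 24) ((5 + 1) * 24) (by norm_num) (by norm_num) (by norm_num) (by norm_num)),
        day_eq _ _ (hsl (6 * 24) ((6 + 1) * 24) (by norm_num) (by norm_num) (by norm_num) (by norm_num))]
    simp only [show PySem.List.pyGetD ["Mon", "Tue", "Wed", "Thu", "Fri", "Sat", "Sun"] (0 : Int) "" = "Mon" from by decide,
      show PySem.List.pyGetD ["Mon", "Tue", "Wed", "Thu", "Fri", "Sat", "Sun"] (1 : Int) "" = "Tue" from by decide,
      show PySem.List.pyGetD ["Mon", "Tue", "Wed", "Thu", "Fri", "Sat", "Sun"] (2 : Int) "" = "Wed" from by decide,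
      show PySem.List.pyGetD ["Mon", "Tue", "Wed", "Thu", "Fri", "Sat", "Sun"] (3 : Int) "" = "Thu" from by decide,
      show PySem.List.pyGetD ["Mon", "Tue", "Wed", "Thu", "Fri", "Sat", "Sun"] (4 : Int) "" = "Fri" from by decide,
      show PySem.List.pyGetD ["Mon", "Tue", "Wed", "Thu", "Fri", "Sat", "Sun"] (5 : Int) "" = "Sat" from by decide,
      show PySem.List.pyGetD ["Mon", "Tue", "Wed", "Thu", "Fri", "Sat", "Sun"] (6 : Int) "" = "Sun" from by decide]
    simp [List.append_assoc]
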